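-- pv_equiv track=rewrite | github.com/ANNNA106/DATIS | cifar10_test_selection.py | get_faults
-- ===== SOURCE A (Python) =====
-- import copy
--
-- def get_faults(sample, mis_ind_test, Clustering_labels):
--     # Fault detection rate calculation helper.
--     neg = 0
--     cluster_lab = []
--     nn = -1
--     for l in sample:
--         if l in mis_ind_test:
--             neg += 1
--             ind = list(mis_ind_test).index(l)
--             if Clustering_labels[ind] > -1:
--                 cluster_lab.append(Clustering_labels[ind])
--             else:
--                 cluster_lab.append(nn)
--                 nn -= 1
--
--     faults_n = len(list(set(cluster_lab)))
--
--     cluster_1noisy = copy.deepcopy(cluster_lab)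
--     for i in range(len(cluster_1noisy)):
--         if cluster_1noisy[i] <= -1:
--             cluster_1noisy[i] = -1
--     faults_1noisy = len(list(set(cluster_1noisy)))
--     return faults_n, faults_1noisy, neg
-- ===== SOURCE B (Python) =====
-- def get_faults(sample, mis_ind_test, Clustering_labels):
--     # One-pass version: index mis_ind_test -> first cluster label once, then a
--     # single scan over sample counting distinct clean clusters and noisy hits.
--     label_of = {}
--     for v, lab in zip(mis_ind_test, Clustering_labels):
--         if v not in label_of:
--             label_of[v] = lab
--     neg = 0
--     noisy = 0
--     clean = set()
--     for l in sample:
--         if l in label_of: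
--             lab = label_of[l]
--             neg += 1
--             if lab > -1:
--                 clean.add(lab)
--             else:
--                 noisy += 1
--     return len(clean) + noisy, len(clean) + (1 if noisy else 0), neg
-- ===== Notes on version B (the rewrite author's own statement) =====
-- stated objective: faster
-- what changed: Replaces the per-sample linear membership test and .index scan (and the two trailing set-building passes) by a value-to-first-label dict built once plus a single pass over sample that maintains the distinct clean-cluster set and a noisy counter, from which both fault counts follow arithmetically.
import Mathlib
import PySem

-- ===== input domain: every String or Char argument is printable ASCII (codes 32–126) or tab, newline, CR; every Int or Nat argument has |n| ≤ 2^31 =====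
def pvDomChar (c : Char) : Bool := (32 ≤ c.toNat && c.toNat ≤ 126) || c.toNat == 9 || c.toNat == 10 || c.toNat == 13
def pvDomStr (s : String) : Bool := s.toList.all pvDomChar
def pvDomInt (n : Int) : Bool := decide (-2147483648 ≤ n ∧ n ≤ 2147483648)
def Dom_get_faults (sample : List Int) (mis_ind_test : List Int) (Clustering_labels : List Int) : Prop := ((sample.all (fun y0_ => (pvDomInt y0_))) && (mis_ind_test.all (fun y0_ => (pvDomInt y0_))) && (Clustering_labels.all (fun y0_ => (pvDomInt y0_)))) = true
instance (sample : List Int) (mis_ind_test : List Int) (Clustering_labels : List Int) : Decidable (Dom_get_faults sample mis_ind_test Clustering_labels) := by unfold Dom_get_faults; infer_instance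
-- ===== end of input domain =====

-- B replaces A's per-element linear membership test and .index scan of mis_ind_test by a
-- value-to-first-label dict built once plus a single pass over sample (objective: faster).

-- ===== PORT A =====
-- 'if x <= -1 then -1 else x' (the rewrite A's second loop applies to each entry)
def pvCollapse (x : Int) : Int := if x ≤ -1 then -1 else x

def pvStepA (mis_ind_test Clustering_labels : List Int) (st : Int × List Int × Int) (l : Int) : Int × List Int × Int :=
  if mis_ind_test.contains l then
    let ind : Nat := (PySem.List.index? mis_ind_test l).getD 0
    if PySem.List.pyGetD Clustering_labels (ind : Int) 0 > -1 then
      (st.1 + 1, st.2.1 ++ [PySem.List.pyGetD Clustering_labels (ind : Int) 0], st.2.2)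
    else
      (st.1 + 1, st.2.1 ++ [st.2.2], st.2.2 - 1)
  else st


def get_faults (sample : List Int) (mis_ind_test : List Int) (Clustering_labels : List Int) : Int × Int × Int :=
  let st := sample.foldl (pvStepA mis_ind_test Clustering_labels) (0, ([], -1))
  let faults_n : Int := (PySem.Set.ofList st.2.1).length
  -- 'for i in range(len(cluster_1noisy)): if cluster_1noisy[i] <= -1: cluster_1noisy[i] = -1'
  -- rewrites each entry in place, i.e. the pointwise map of pvCollapse
  let cluster_1noisy := st.2.1.map pvCollapse
  let faults_1noisy : Int := (PySem.Set.ofList cluster_1noisy).length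
  (faults_n, faults_1noisy, st.1)

-- ===== PORT B =====
def pvBuild (mis_ind_test Clustering_labels : List Int) : PySem.Dict Int Int :=
  (mis_ind_test.zip Clustering_labels).foldl
    (fun d p => if d.contains p.1 then d else d.insert p.1 p.2) PySem.Dict.empty

def pvStepB (label_of : PySem.Dict Int Int) (st : Int × Int × PySem.Set Int) (l : Int) : Int × Int × PySem.Set Int :=
  match label_of.get? l with
  | some lab =>
      if lab > -1 then (st.1 + 1, st.2.1, PySem.Set.add st.2.2 lab)
      else (st.1 + 1, st.2.1 + 1, st.2.2)
  | none => st


def get_faults_alt (sample : List Int) (mis_ind_test : List Int) (Clustering_labels : List Int) : Int × Int × Int :=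
  let st := sample.foldl (pvStepB (pvBuild mis_ind_test Clustering_labels)) (0, (0, PySem.Set.empty))
  ((st.2.2.length : Int) + st.2.1, (st.2.2.length : Int) + (if st.2.1 = 0 then 0 else 1), st.1)

-- ===== PRECONDITION & SPEC =====
-- A raises IndexError exactly when some sampled element's first index in mis_ind_test falls
-- beyond the end of Clustering_labels; Pre_ excludes exactly those inputs (A returns everywhere else).
def Pre_get_faults (sample : List Int) (mis_ind_test : List Int) (Clustering_labels : List Int) : Prop :=
  ∀ l ∈ sample, l ∈ mis_ind_test → mis_ind_test.idxOf l < Clustering_labels.length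
instance (sample : List Int) (mis_ind_test : List Int) (Clustering_labels : List Int) : Decidable (Pre_get_faults sample mis_ind_test Clustering_labels) := by unfold Pre_get_faults; infer_instance

def pvWitness_get_faults : List Int × List Int × List Int := ([1, 2, 2, -3], [2, 3], [10, -5])

def Spec_get_faults (sample : List Int) (mis_ind_test : List Int) (Clustering_labels : List Int) (out : Int × Int × Int) : Prop := out = get_faults_alt sample mis_ind_test Clustering_labels
instance (sample : List Int) (mis_ind_test : List Int) (Clustering_labels : List Int) (out : Int × Int × Int) : Decidable (Spec_get_faults sample mis_ind_test Clustering_labels out) := by unfold Spec_get_faults; infer_instance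

-- ===== CLAIM (what is proved, stated in full; the proofs are below) =====
def Claim_equal_get_faults : Prop := ∀ (sample : List Int) (mis_ind_test : List Int) (Clustering_labels : List Int), Dom_get_faults sample mis_ind_test Clustering_labels → Pre_get_faults sample mis_ind_test Clustering_labels → Spec_get_faults sample mis_ind_test Clustering_labels (get_faults sample mis_ind_test Clustering_labels)

-- ===== LEMMAS AND PROOFS =====

def pvFirstVal (ps : List (Int × Int)) (v : Int) : Option Int :=
  (ps.find? (fun p => p.1 == v)).map (·.2)

lemma pvFirstVal_cons (p : Int × Int) (ps : List (Int × Int)) (v : Int) :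
    pvFirstVal (p :: ps) v = if p.1 = v then some p.2 else pvFirstVal ps v := by
  by_cases h : p.1 = v <;> simp [pvFirstVal, List.find?_cons, h]

lemma pv_get?_foldl (ps : List (Int × Int)) (d : PySem.Dict Int Int) (v : Int) :
    (ps.foldl (fun d p => if d.contains p.1 then d else d.insert p.1 p.2) d).get? v
      = (d.get? v).or (pvFirstVal ps v) := by
  induction ps generalizing d with
  | nil => simp [pvFirstVal]
  | cons p ps ih =>
    rw [List.foldl_cons, ih, pvFirstVal_cons]
    by_cases hc : d.contains p.1 = true
    · rw [if_pos hc]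
      by_cases hv : p.1 = v
      · subst hv
        obtain ⟨w, hw⟩ : ∃ w, d.get? p.1 = some w := Option.isSome_iff_exists.mp (by
          rw [← PySem.Dict.contains_eq_isSome_get?]; exact hc)
        simp [hw]
      · rw [if_neg hv]
    · rw [if_neg hc]
      by_cases hv : p.1 = v
      · subst hv
        rw [if_pos rfl]
        have hd : d.get? p.1 = none := by
          rw [PySem.Dict.get?_eq_none_iff_contains]; simpa using hc
        simp [PySem.Dict.get?_insert_self, hd]
      · rw [if_neg hv, PySem.Dict.get?_insert_of_ne d p.2 (Ne.symm hv)]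

lemma pv_firstVal_zip_of_not_mem (mis labels : List Int) (v : Int) (h : v ∉ mis) :
    pvFirstVal (mis.zip labels) v = none := by
  have hf : (mis.zip labels).find? (fun p => p.1 == v) = none := by
    rw [List.find?_eq_none]
    intro p hp
    have := (List.of_mem_zip hp).1
    simp only [beq_iff_eq]
    intro hpv; exact h (hpv ▸ this)
  simp [pvFirstVal, hf]

lemma pv_firstVal_zip_of_lt (mis labels : List Int) (v : Int) (hm : v ∈ mis)
    (hlt : mis.idxOf v < labels.length) :
    pvFirstVal (mis.zip labels) v = labels[mis.idxOf v]? := by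
  induction mis generalizing labels with
  | nil => simp at hm
  | cons m ms ih =>
    cases labels with
    | nil => simp at hlt
    | cons a as =>
      by_cases hv : m = v
      · subst hv
        rw [List.zip_cons_cons, pvFirstVal_cons, if_pos rfl]
        simp
      · have hm' : v ∈ ms := by
          cases hm with
          | head => exact absurd rfl hv
          | tail _ h => exact h
        have hidx : (m :: ms).idxOf v = ms.idxOf v + 1 := by
          simp [List.idxOf_cons, hv]
        rw [hidx] at hlt ⊢
        rw [List.zip_cons_cons, pvFirstVal_cons, if_neg hv, List.getElem?_cons_succ]
        exact ih as hm' (by simp only [List.length_cons] at hlt; omega)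

lemma pv_index?_of_mem (xs : List Int) (v : Int) (h : v ∈ xs) :
    PySem.List.index? xs v = some (xs.idxOf v) := by
  induction xs with
  | nil => simp at h
  | cons x xs ih =>
    by_cases hv : x = v
    · subst hv
      rw [PySem.List.index?_cons_self]
      simp
    · have hm : v ∈ xs := by
        cases h with
        | head => exact absurd rfl hv
        | tail _ h => exact h
      rw [PySem.List.index?_cons_of_ne xs hv, ih hm]
      simp [List.idxOf_cons, hv]

lemma pv_get?_build (mis labels : List Int) (v : Int) :
    (pvBuild mis labels).get? v = pvFirstVal (mis.zip labels) v := by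
  rw [pvBuild, pv_get?_foldl]
  simp

lemma pv_loop_eq (mis labels : List Int) (sample : List Int)
    (hpre : ∀ l ∈ sample, l ∈ mis → mis.idxOf l < labels.length)
    (neg : Int) (clab : List Int) (nh : Int) (pos : PySem.Set Int)
    (hnh : 0 ≤ nh)
    (h3 : ∀ x ∈ clab, -1 - nh < x)
    (h4 : ∀ x : Int, -1 < x → (x ∈ clab ↔ x ∈ pos))
    (h6 : ((PySem.Set.ofList clab).length : Int) = pos.length + nh)
    (h7 : ((-1 : Int) ∈ clab.map pvCollapse ↔ nh ≠ 0))
    (h8 : ((PySem.Set.ofList (clab.map pvCollapse)).length : Int)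
            = pos.length + (if nh = 0 then 0 else 1)) :
    (((PySem.Set.ofList (List.foldl (pvStepA mis labels) (neg, clab, -1 - nh) sample).2.1).length : Int),
     ((PySem.Set.ofList ((List.foldl (pvStepA mis labels) (neg, clab, -1 - nh) sample).2.1.map pvCollapse)).length : Int),
     (List.foldl (pvStepA mis labels) (neg, clab, -1 - nh) sample).1)
    = (((List.foldl (pvStepB (pvBuild mis labels)) (neg, nh, pos) sample).2.2.length : Int)
         + (List.foldl (pvStepB (pvBuild mis labels)) (neg, nh, pos) sample).2.1,
       ((List.foldl (pvStepB (pvBuild mis labels)) (neg, nh, pos) sample).2.2.length : Int)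
         + (if (List.foldl (pvStepB (pvBuild mis labels)) (neg, nh, pos) sample).2.1 = 0 then 0 else 1),
       (List.foldl (pvStepB (pvBuild mis labels)) (neg, nh, pos) sample).1) := by
  induction sample generalizing neg clab nh pos with
  | nil =>
    simp only [List.foldl_nil]
    refine Prod.ext ?_ (Prod.ext ?_ rfl)
    · simpa using h6
    · simpa using h8
  | cons l rest ih =>
    have hpre' : ∀ l' ∈ rest, l' ∈ mis → mis.idxOf l' < labels.length :=
      fun l' hl' => hpre l' (List.mem_cons_of_mem _ hl')
    rw [List.foldl_cons, List.foldl_cons]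
    by_cases hmem : l ∈ mis
    · have hlt := hpre l List.mem_cons_self hmem
      have hcont : mis.contains l = true := by simpa using hmem
      have hget : (pvBuild mis labels).get? l = some (labels.getD (mis.idxOf l) 0) := by
        rw [pv_get?_build, pv_firstVal_zip_of_lt mis labels l hmem hlt,
          List.getElem?_eq_getElem hlt, List.getD_eq_getElem labels 0 hlt]
      have hval : PySem.List.pyGetD labels ((((PySem.List.index? mis l).getD 0 : Nat)) : Int) 0
          = labels.getD (mis.idxOf l) 0 := by
        rw [pv_index?_of_mem mis l hmem]
        simp
      set v : Int := labels.getD (mis.idxOf l) 0 with hvdef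
      have hA : pvStepA mis labels (neg, clab, -1 - nh) l
          = (if v > -1 then (neg + 1, clab ++ [v], -1 - nh)
             else (neg + 1, clab ++ [-1 - nh], -1 - nh - 1)) := by
        simp only [pvStepA, hcont, if_true, hval]
      have hB : pvStepB (pvBuild mis labels) (neg, nh, pos) l
          = (if v > -1 then (neg + 1, nh, PySem.Set.add pos v)
             else (neg + 1, nh + 1, pos)) := by
        simp only [pvStepB, hget]
      by_cases hvp : v > -1
      · rw [hA, hB, if_pos hvp, if_pos hvp]
        have hiff : v ∈ clab ↔ v ∈ pos := h4 v hvp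
        have hmapiff : v ∈ clab.map pvCollapse ↔ v ∈ pos := by
          constructor
          · intro hx
            obtain ⟨x, hx1, hx2⟩ := List.mem_map.mp hx
            have : x = v := by
              by_cases hxle : x ≤ -1
              · simp [pvCollapse, hxle] at hx2; omega
              · simpa [pvCollapse, hxle] using hx2
            exact hiff.mp (this ▸ hx1)
          · intro hx
            exact List.mem_map.mpr ⟨v, hiff.mpr hx, by simp only [pvCollapse]; rw [if_neg (by omega)]⟩
        refine ih hpre' (neg + 1) (clab ++ [v]) nh (PySem.Set.add pos v) hnh ?_ ?_ ?_ ?_ ?_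
        · intro x hx
          rcases List.mem_append.mp hx with hx | hx
          · exact h3 x hx
          · have : x = v := by simpa using hx
            omega
        · intro x hxgt
          rw [List.mem_append, PySem.Set.mem_add]
          constructor
          · rintro (hx | hx)
            · exact Or.inl ((h4 x hxgt).mp hx)
            · exact Or.inr (by simpa using hx)
          · rintro (hx | hx)
            · exact Or.inl ((h4 x hxgt).mpr hx)
            · simp [hx]
        · rw [PySem.Set.ofList_append_singleton, PySem.Set.add_eq_ite, PySem.Set.add_eq_ite]
          by_cases hvpos : v ∈ pos
          · rw [if_pos ((PySem.Set.mem_ofList clab v).mpr (hiff.mpr hvpos)), if_pos hvpos]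
            exact h6
          · rw [if_neg (fun h => hvpos (hiff.mp ((PySem.Set.mem_ofList clab v).mp h))),
              if_neg hvpos]
            simp only [List.length_append, List.length_cons, List.length_nil]
            push_cast
            omega
        · rw [List.map_append]
          simp only [List.map_cons, List.map_nil, List.mem_append, List.mem_singleton]
          have : pvCollapse v = v := by simp only [pvCollapse]; rw [if_neg (by omega)]
          rw [this]
          constructor
          · rintro (hx | hx)
            · exact h7.mp hx
            · omega
          · intro hx
            exact Or.inl (h7.mpr hx)
        · rw [List.map_append]
          have hcv : pvCollapse v = v := by simp only [pvCollapse]; rw [if_neg (by omega)]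
          simp only [List.map_cons, List.map_nil, hcv]
          rw [PySem.Set.ofList_append_singleton, PySem.Set.add_eq_ite, PySem.Set.add_eq_ite]
          by_cases hvpos : v ∈ pos
          · rw [if_pos ((PySem.Set.mem_ofList _ v).mpr (hmapiff.mpr hvpos)), if_pos hvpos]
            exact h8
          · rw [if_neg (fun h => hvpos (hmapiff.mp ((PySem.Set.mem_ofList _ v).mp h))),
              if_neg hvpos]
            simp only [List.length_append, List.length_cons, List.length_nil]
            push_cast
            omega
      · rw [hA, hB, if_neg hvp, if_neg hvp]
        have hstep : (-1 : Int) - nh - 1 = -1 - (nh + 1) := by ring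
        rw [hstep]
        refine ih hpre' (neg + 1) (clab ++ [-1 - nh]) (nh + 1) pos (by omega) ?_ ?_ ?_ ?_ ?_
        · intro x hx
          rcases List.mem_append.mp hx with hx | hx
          · have := h3 x hx; omega
          · have : x = -1 - nh := by simpa using hx
            omega
        · intro x hxgt
          rw [List.mem_append]
          constructor
          · rintro (hx | hx)
            · exact (h4 x hxgt).mp hx
            · have : x = -1 - nh := by simpa using hx
              omega
          · intro hx
            exact Or.inl ((h4 x hxgt).mpr hx)
        · rw [PySem.Set.ofList_append_singleton,
            PySem.Set.add_of_not_mem (fun h => by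
              have := h3 _ ((PySem.Set.mem_ofList clab _).mp h); omega)]
          simp only [List.length_append, List.length_cons, List.length_nil]
          push_cast
          omega
        · rw [List.map_append]
          have hcn : pvCollapse (-1 - nh) = -1 := by simp only [pvCollapse]; rw [if_pos (by omega)]
          simp only [List.map_cons, List.map_nil, List.mem_append, List.mem_singleton, hcn]
          constructor
          · intro _; omega
          · intro _; exact Or.inr trivial
        · rw [List.map_append]
          have hcn : pvCollapse (-1 - nh) = -1 := by simp only [pvCollapse]; rw [if_pos (by omega)]
          simp only [List.map_cons, List.map_nil, hcn]
          rw [PySem.Set.ofList_append_singleton, PySem.Set.add_eq_ite]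
          have hite : (if nh + 1 = 0 then (0:Int) else 1) = 1 := by
            rw [if_neg (by omega)]
          rw [hite]
          by_cases hnz : nh = 0
          · have hnotin : (-1:Int) ∉ PySem.Set.ofList (clab.map pvCollapse) := by
              rw [PySem.Set.mem_ofList]
              intro h; exact (h7.mp h) hnz
            rw [if_neg hnotin]
            simp only [List.length_append, List.length_cons, List.length_nil]
            rw [if_pos hnz] at h8
            push_cast
            omega
          · have hin : (-1:Int) ∈ PySem.Set.ofList (clab.map pvCollapse) := by
              rw [PySem.Set.mem_ofList]; exact h7.mpr hnz
            rw [if_pos hin]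
            rw [if_neg hnz] at h8
            omega
    · have hcont : mis.contains l = false := by simpa using hmem
      have hget : (pvBuild mis labels).get? l = none := by
        rw [pv_get?_build]
        exact pv_firstVal_zip_of_not_mem mis labels l hmem
      have hA : pvStepA mis labels (neg, clab, -1 - nh) l = (neg, clab, -1 - nh) := by
        simp [pvStepA, hmem]
      have hB : pvStepB (pvBuild mis labels) (neg, nh, pos) l = (neg, nh, pos) := by
        simp [pvStepB, hget]
      rw [hA, hB]
      exact ih hpre' neg clab nh pos hnh h3 h4 h6 h7 h8

-- ===== VERDICT (by name: the statement is the Claim_ definition above) =====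
theorem get_faults_spec : Claim_equal_get_faults := by
  intro sample mis labels _ hpre
  unfold Spec_get_faults
  have h := pv_loop_eq mis labels sample hpre 0 [] 0 PySem.Set.empty (le_refl 0)
    (by intro x hx; simp at hx) (by intro x _; simp [PySem.Set.empty])
    (by decide) (by simp) (by decide)
  rw [show (-1 : Int) - 0 = -1 from by ring] at h
  simp only [get_faults, get_faults_alt]
  exact h
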